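-- pv_equiv track=rewrite | github.com/AdamLatos/slimfly-gen | slimfly_gen.py | create_routes
-- ===== SOURCE A (Python) =====
-- def create_routes(q, Fq, X1, X2):
--     keys = [(i,x,y) for i in range(2) for x in Fq for y in Fq]
--     routes = {k: [] for k in keys}
--
--     for x in Fq:
--         for y in Fq:
--             for yp in Fq:
--                 if (y - yp) in X1:
--                     routes[(0,x,y)].append((0,x,yp))
--                     routes[(0,x,yp)].append((0,x,y))
--                 if (y - yp) in X2:
--                     routes[(1,x,y)].append((1,x,yp))
--                     routes[(1,x,yp)].append((1,x,y))
--                 for xp in Fq: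
--                     if (xp * x + yp) % q == y:
--                         routes[(0,x,y)].append((1,xp,yp))
--                         routes[(1,xp,yp)].append((0,x,y))
--     return routes
-- ===== SOURCE B (Python) =====
-- def create_routes(q, Fq, X1, X2):
--     routes = {(i, x, y): [] for i in (0, 1) for x in Fq for y in Fq}
--
--     def link(u, v):
--         routes[u].append(v)
--         routes[v].append(u)
--
--     S1, S2 = set(X1), set(X2)
--
--     # Per y (independently of x): the yp's that can produce any append, with their
--     # flags; t is the residue class (y - yp) % q of the xp's solving
--     # (xp*x + yp) % q == y, or None when that congruence guard fails.
--     active = {}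
--     for y in Fq:
--         if y in active:
--             continue
--         acts = []
--         for yp in Fq:
--             d = y - yp
--             in1 = d in S1
--             in2 = d in S2
--             t = d % q
--             if (t + yp) % q != y:
--                 t = None
--             if in1 or in2 or t is not None:
--                 acts.append((yp, in1, in2, t))
--         active[y] = acts
--
--     for x in Fq:
--         # group the xp's by (xp * x) % q once per x: solving the congruence is a lookup
--         groups = {}
--         for xp in Fq:
--             groups.setdefault((xp * x) % q, []).append(xp)
--         for y in Fq:
--             for (yp, in1, in2, t) in active[y]:
--                 if in1:
--                     link((0, x, y), (0, x, yp))
--                 if in2: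
--                     link((1, x, y), (1, x, yp))
--                 if t is not None:
--                     for xp in groups.get(t, []):
--                         link((0, x, y), (1, xp, yp))
--     return routes
-- ===== Notes on version B (the rewrite author's own statement) =====
-- stated objective: faster
-- what changed: B precomputes, once per y, the short list of yp's that can produce any append (x-independent flags for the X1/X2 tests and the congruence guard) and, once per x, a dict grouping xp by (xp*x)%q, so each (x,y) step only walks productive entries and solves (xp*x+yp)%q==y by a single residue lookup instead of scanning all xp.
import Mathlib
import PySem

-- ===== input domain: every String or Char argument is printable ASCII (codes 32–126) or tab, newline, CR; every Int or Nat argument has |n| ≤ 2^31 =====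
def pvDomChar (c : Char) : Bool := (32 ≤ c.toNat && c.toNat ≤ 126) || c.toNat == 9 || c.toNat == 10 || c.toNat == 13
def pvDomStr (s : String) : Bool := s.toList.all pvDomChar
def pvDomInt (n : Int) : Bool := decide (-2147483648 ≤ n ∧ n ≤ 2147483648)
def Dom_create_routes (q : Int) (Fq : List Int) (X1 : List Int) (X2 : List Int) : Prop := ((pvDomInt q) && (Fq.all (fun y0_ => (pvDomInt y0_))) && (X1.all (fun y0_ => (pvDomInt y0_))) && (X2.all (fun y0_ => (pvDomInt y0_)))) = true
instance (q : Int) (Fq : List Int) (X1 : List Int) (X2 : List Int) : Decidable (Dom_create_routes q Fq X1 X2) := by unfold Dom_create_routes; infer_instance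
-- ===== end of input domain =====

-- B replaces A's blind scans by a per-y table of the productive yp's and a per-x dict grouping xp
-- by (xp*x)%q, so each (x,y) step only touches entries that actually append; return values proved equal on Pre_.

-- ===== PORT A =====
-- shared helper: the two-append pattern 'routes[kA].append(vA); routes[kB].append(vB)'.
-- Python's 'routes[k].append(v)' is ported as 'Dict.modify k [] (· ++ [v])' — exact here because every
-- key used is always present: all loop variables range over Fq, and every (i,x,y) with x,y ∈ Fq is a key.
def pvEdge (d : PySem.Dict (Int × Int × Int) (List (Int × Int × Int)))
    (kA vA kB vB : Int × Int × Int) : PySem.Dict (Int × Int × Int) (List (Int × Int × Int)) :=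
  (d.modify kA [] (· ++ [vA])).modify kB [] (· ++ [vB])

-- keys = [(i,x,y) for i in range(2) for x in Fq for y in Fq]
def pvKeys (Fq : List Int) : List (Int × Int × Int) :=
  (PySem.List.pyRange 0 2 1).flatMap (fun i => Fq.flatMap (fun x => Fq.map (fun y => (i, x, y))))

-- routes = {k: [] for k in keys}
def pvInit (Fq : List Int) : PySem.Dict (Int × Int × Int) (List (Int × Int × Int)) :=
  (pvKeys Fq).foldl (fun d k => d.insert k []) PySem.Dict.empty

-- A's two 'if (y - yp) in X1/X2' blocks
def pvXpart (x y yp : Int) (X1 X2 : List Int)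
    (d : PySem.Dict (Int × Int × Int) (List (Int × Int × Int))) :
    PySem.Dict (Int × Int × Int) (List (Int × Int × Int)) :=
  let d := if (y - yp) ∈ X1 then pvEdge d (0, x, y) (0, x, yp) (0, x, yp) (0, x, y) else d
  if (y - yp) ∈ X2 then pvEdge d (1, x, y) (1, x, yp) (1, x, yp) (1, x, y) else d

-- A's innermost loop: 'for xp in Fq: if (xp * x + yp) % q == y: …'
def pvInnerA (q x y yp : Int) (Fq : List Int)
    (d : PySem.Dict (Int × Int × Int) (List (Int × Int × Int))) :
    PySem.Dict (Int × Int × Int) (List (Int × Int × Int)) :=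
  Fq.foldl (fun d xp =>
    if PySem.Int.mod (xp * x + yp) q = y then
      pvEdge d (0, x, y) (1, xp, yp) (1, xp, yp) (0, x, y)
    else d) d

def create_routes (q : Int) (Fq : List Int) (X1 : List Int) (X2 : List Int) :
    List (Int × Int × Int × List (Int × Int × Int)) :=
  (Fq.foldl (fun d x =>
      Fq.foldl (fun d y =>
        Fq.foldl (fun d yp => pvInnerA q x y yp Fq (pvXpart x y yp X1 X2 d)) d) d)
    (pvInit Fq)).items.map (fun kv => (kv.1.1, kv.1.2.1, kv.1.2.2, kv.2))

-- ===== PORT B =====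
-- routes = {(i, x, y): [] for i in (0, 1) for x in Fq for y in Fq}
def pvInitB (Fq : List Int) : PySem.Dict (Int × Int × Int) (List (Int × Int × Int)) :=
  (([0, 1] : List Int).flatMap (fun i => Fq.flatMap (fun x => Fq.map (fun y => (i, x, y))))).foldl
    (fun d k => d.insert k []) PySem.Dict.empty

-- def link(u, v): routes[u].append(v); routes[v].append(u)
def pvLink (d : PySem.Dict (Int × Int × Int) (List (Int × Int × Int)))
    (u v : Int × Int × Int) : PySem.Dict (Int × Int × Int) (List (Int × Int × Int)) :=
  (d.modify u [] (· ++ [v])).modify v [] (· ++ [u])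

-- B's inner precompute loop for one y: the records (yp, in1, in2, t) of the yp's that can append
def pvActs (q : Int) (S1 S2 : List Int) (Fq : List Int) (y : Int) :
    List (Int × Bool × Bool × Option Int) :=
  Fq.foldl (fun acc yp =>
    let dd := y - yp
    let in1 := decide (dd ∈ S1)
    let in2 := decide (dd ∈ S2)
    let t : Option Int :=
      if PySem.Int.mod (PySem.Int.mod dd q + yp) q ≠ y then none else some (PySem.Int.mod dd q)
    if in1 || in2 || t.isSome then acc ++ [(yp, in1, in2, t)] else acc) []

-- active = {}; for y in Fq: if y in active: continue; … active[y] = acts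
def pvActive (q : Int) (S1 S2 : List Int) (Fq : List Int) :
    PySem.Dict Int (List (Int × Bool × Bool × Option Int)) :=
  Fq.foldl (fun a y => if a.contains y then a else a.insert y (pvActs q S1 S2 Fq y))
    PySem.Dict.empty

-- groups = {}; for xp in Fq: groups.setdefault((xp * x) % q, []).append(xp)
def pvGroups (q x : Int) (Fq : List Int) : PySem.Dict Int (List Int) :=
  Fq.foldl (fun g xp => g.modify (PySem.Int.mod (xp * x) q) [] (· ++ [xp])) PySem.Dict.empty

-- B's body for one record of active[y]
def pvStepB (q x y : Int) (groups : PySem.Dict Int (List Int))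
    (d : PySem.Dict (Int × Int × Int) (List (Int × Int × Int)))
    (r : Int × Bool × Bool × Option Int) :
    PySem.Dict (Int × Int × Int) (List (Int × Int × Int)) :=
  let yp := r.1
  let d := if r.2.1 then pvLink d (0, x, y) (0, x, yp) else d
  let d := if r.2.2.1 then pvLink d (1, x, y) (1, x, yp) else d
  match r.2.2.2 with
  | some t => (groups.getD t []).foldl (fun d xp => pvLink d (0, x, y) (1, xp, yp)) d
  | none => d

def create_routes_alt (q : Int) (Fq : List Int) (X1 : List Int) (X2 : List Int) :
    List (Int × Int × Int × List (Int × Int × Int)) :=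
  let S1 := PySem.Set.ofList X1
  let S2 := PySem.Set.ofList X2
  let active := pvActive q S1 S2 Fq
  (Fq.foldl (fun d x =>
      let groups := pvGroups q x Fq
      Fq.foldl (fun d y => (active.getD y []).foldl (pvStepB q x y groups) d) d)
    (pvInitB Fq)).items.map (fun kv => (kv.1.1, kv.1.2.1, kv.1.2.2, kv.2))

-- ===== PRECONDITION & SPEC =====
-- Pre_ excludes exactly the inputs where Python A raises ZeroDivisionError: q = 0 with Fq nonempty
-- (the '% q' in the loop body is reached as soon as Fq is nonempty; B raises there too).
def Pre_create_routes (q : Int) (Fq : List Int) (X1 : List Int) (X2 : List Int) : Prop :=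
  Fq = [] ∨ q ≠ 0
instance (q : Int) (Fq : List Int) (X1 : List Int) (X2 : List Int) : Decidable (Pre_create_routes q Fq X1 X2) := by unfold Pre_create_routes; infer_instance

def pvWitness_create_routes : Int × List Int × List Int × List Int := (3, [0, 1, 2], [1, 2], [1])

def Spec_create_routes (q : Int) (Fq : List Int) (X1 : List Int) (X2 : List Int) (out : List (Int × Int × Int × List (Int × Int × Int))) : Prop := out = create_routes_alt q Fq X1 X2
instance (q : Int) (Fq : List Int) (X1 : List Int) (X2 : List Int) (out : List (Int × Int × Int × List (Int × Int × Int))) : Decidable (Spec_create_routes q Fq X1 X2 out) := by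
  unfold Spec_create_routes
  letI h1 : DecidableEq (Int × Int × Int × List (Int × Int × Int)) := instDecidableEqProd
  infer_instance

-- ===== CLAIM (what is proved, stated in full; the proofs are below) =====
def Claim_equal_create_routes : Prop := ∀ (q : Int) (Fq : List Int) (X1 : List Int) (X2 : List Int), Dom_create_routes q Fq X1 X2 → Pre_create_routes q Fq X1 X2 → Spec_create_routes q Fq X1 X2 (create_routes q Fq X1 X2)

-- ===== LEMMAS AND PROOFS =====

-- Python '%' is invariant under shifting the argument by its own remainder (true for every q, q = 0 included).
theorem pvMod_shift (q a c : Int) :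
    PySem.Int.mod (PySem.Int.mod a q + c) q = PySem.Int.mod (a + c) q := by
  have h : PySem.Int.mod a q + c = (a + c) + q * (-(PySem.Int.floordiv a q)) := by
    have := PySem.Int.floordiv_mul_add_mod a q
    linarith
  rw [h]
  simp [PySem.Int.mod]

-- A's membership test '(xp*x + yp) % q == y' decomposes into B's residue-class test plus B's guard.
theorem pvKey_iff (q a yp y : Int) :
    PySem.Int.mod (a + yp) q = y ↔
      (PySem.Int.mod a q = PySem.Int.mod (y - yp) q ∧
       PySem.Int.mod (PySem.Int.mod (y - yp) q + yp) q = y) := by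
  constructor
  · intro h
    have h0 : PySem.Int.mod (PySem.Int.mod (a + yp) q) q = PySem.Int.mod (a + yp) q := by
      simpa using pvMod_shift q (a + yp) 0
    have idem : PySem.Int.mod y q = y := by rw [← h]; exact h0
    have h1 : PySem.Int.mod a q = PySem.Int.mod (y - yp) q := by
      have hs := pvMod_shift q (a + yp) (-yp)
      rw [h] at hs
      have e1 : y + -yp = y - yp := by ring
      have e2 : a + yp + -yp = a := by ring
      rw [e1, e2] at hs
      exact hs.symm
    refine ⟨h1, ?_⟩
    have e : y - yp + yp = y := by ring
    rw [pvMod_shift, e, idem]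
  · rintro ⟨h1, h2⟩
    calc PySem.Int.mod (a + yp) q
        = PySem.Int.mod (PySem.Int.mod a q + yp) q := (pvMod_shift q a yp).symm
      _ = PySem.Int.mod (PySem.Int.mod (y - yp) q + yp) q := by rw [h1]
      _ = y := h2

-- the grouping dict looked up at t is exactly the sublist of Fq in residue class t
theorem pvGroups_getD (q x t : Int) (Fq : List Int) :
    (pvGroups q x Fq).getD t [] = Fq.filter (fun xp => PySem.Int.mod (xp * x) q == t) := by
  unfold pvGroups
  rw [show Fq.foldl (fun g xp => g.modify (PySem.Int.mod (xp * x) q) [] (· ++ [xp])) PySem.Dict.empty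
        = (Fq.map (fun xp => (PySem.Int.mod (xp * x) q, xp))).foldl
            (fun d p => d.modify p.1 [] (· ++ [p.2])) PySem.Dict.empty
      from (List.foldl_map (f := fun xp => (PySem.Int.mod (xp * x) q, xp))
            (g := fun (d : PySem.Dict Int (List Int)) p => d.modify p.1 [] (· ++ [p.2]))).symm]
  rw [PySem.Dict.getD_foldl_modify_append]
  simp [List.filter_map, Function.comp_def]

-- A's innermost scan over Fq equals a single group lookup guarded by B's congruence test
theorem pvInnerA_eq (q x y yp : Int) (Fq : List Int)
    (d : PySem.Dict (Int × Int × Int) (List (Int × Int × Int))) :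
    pvInnerA q x y yp Fq d =
      if PySem.Int.mod (PySem.Int.mod (y - yp) q + yp) q = y then
        ((pvGroups q x Fq).getD (PySem.Int.mod (y - yp) q) []).foldl
          (fun d xp => pvEdge d (0, x, y) (1, xp, yp) (1, xp, yp) (0, x, y)) d
      else d := by
  unfold pvInnerA
  rw [PySem.List.foldl_ite_eq_foldl_filter
        (p := fun xp => PySem.Int.mod (xp * x + yp) q = y), pvGroups_getD]
  by_cases hc : PySem.Int.mod (PySem.Int.mod (y - yp) q + yp) q = y
  · rw [if_pos hc]
    congr 1
    apply List.filter_congr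
    intro xp _
    have : PySem.Int.mod (xp * x + yp) q = y ↔ PySem.Int.mod (xp * x) q = PySem.Int.mod (y - yp) q := by
      rw [pvKey_iff]
      simp [hc]
    by_cases h2 : PySem.Int.mod (xp * x) q = PySem.Int.mod (y - yp) q <;> simp [this, h2]
  · rw [if_neg hc]
    have hnil : Fq.filter (fun xp => decide (PySem.Int.mod (xp * x + yp) q = y)) = [] := by
      apply List.filter_eq_nil_iff.mpr
      intro xp _
      simp only [decide_eq_true_eq]
      intro h
      exact hc ((pvKey_iff q (xp * x) yp y).mp h).2
    rw [hnil]
    rfl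

-- the memoising 'if y in active: continue' loop: the invariant that every stored value is v of its key
theorem pvMemo_invariant {β : Type} (v : Int → β) :
    ∀ (l : List Int) (d : PySem.Dict Int β),
      (∀ k, d.get? k = none ∨ d.get? k = some (v k)) →
      ((∀ k, (l.foldl (fun a y => if a.contains y then a else a.insert y (v y)) d).get? k = none ∨
             (l.foldl (fun a y => if a.contains y then a else a.insert y (v y)) d).get? k = some (v k)) ∧
       (∀ k, d.contains k = true →
             (l.foldl (fun a y => if a.contains y then a else a.insert y (v y)) d).contains k = true) ∧
       (∀ y ∈ l, (l.foldl (fun a y => if a.contains y then a else a.insert y (v y)) d).contains y = true)) := by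
  intro l
  induction l with
  | nil => intro d hd; exact ⟨hd, fun k hk => hk, fun y hy => absurd hy (List.not_mem_nil)⟩
  | cons y0 tl ih =>
    intro d hd
    simp only [List.foldl_cons]
    by_cases h0 : d.contains y0 = true
    · rw [if_pos h0]
      obtain ⟨i1, i2, i3⟩ := ih d hd
      exact ⟨i1, i2, fun y hy => by
        rcases List.mem_cons.mp hy with h | h
        · exact h ▸ i2 y0 h0
        · exact i3 y h⟩
    · rw [if_neg h0]
      have hd' : ∀ k, (d.insert y0 (v y0)).get? k = none ∨ (d.insert y0 (v y0)).get? k = some (v k) := by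
        intro k
        rw [PySem.Dict.get?_insert]
        by_cases hk : k = y0
        · right; rw [if_pos hk, hk]
        · rw [if_neg hk]; exact hd k
      obtain ⟨i1, i2, i3⟩ := ih (d.insert y0 (v y0)) hd'
      refine ⟨i1, ?_, ?_⟩
      · intro k hk
        apply i2
        rw [PySem.Dict.contains_insert, hk]
        simp
      · intro y hy
        rcases List.mem_cons.mp hy with h | h
        · subst h
          apply i2
          exact PySem.Dict.contains_insert_self _ _ _
        · exact i3 y h

-- looking the memo dict up at any y ∈ Fq gives exactly the per-y record list
theorem pvActive_getD (q : Int) (S1 S2 : List Int) (Fq : List Int) (y : Int) (hy : y ∈ Fq) :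
    (pvActive q S1 S2 Fq).getD y [] = pvActs q S1 S2 Fq y := by
  obtain ⟨i1, _, i3⟩ := pvMemo_invariant (pvActs q S1 S2 Fq) Fq PySem.Dict.empty
    (fun k => Or.inl (PySem.Dict.get?_empty k))
  have hc := i3 y hy
  unfold pvActive
  rcases i1 y with h | h
  · exfalso
    have hnc := (PySem.Dict.get?_eq_none_iff_contains _ _).mp h
    rw [hnc] at hc
    exact Bool.false_ne_true hc
  · exact PySem.Dict.getD_of_get?_eq_some _ _ h
-- per (y, yp): the Bool/Option record B stores (written against A's lists X1, X2)
def pvRec (q : Int) (X1 X2 : List Int) (y yp : Int) : Int × Bool × Bool × Option Int :=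
  (yp, decide ((y - yp) ∈ X1), decide ((y - yp) ∈ X2),
    if PySem.Int.mod (PySem.Int.mod (y - yp) q + yp) q ≠ y then none
    else some (PySem.Int.mod (y - yp) q))

def pvFlag (q : Int) (X1 X2 : List Int) (y yp : Int) : Bool :=
  (pvRec q X1 X2 y yp).2.1 || (pvRec q X1 X2 y yp).2.2.1 || (pvRec q X1 X2 y yp).2.2.2.isSome

-- the record list B builds is the flagged sublist of Fq, mapped through pvRec
theorem pvActs_eq (q : Int) (X1 X2 : List Int) (Fq : List Int) (y : Int) :
    pvActs q (PySem.Set.ofList X1) (PySem.Set.ofList X2) Fq y =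
      (Fq.filter (pvFlag q X1 X2 y)).map (pvRec q X1 X2 y) := by
  simp only [pvActs]
  rw [PySem.List.foldl_append_if
      (p := fun yp => decide ((y - yp) ∈ PySem.Set.ofList X1) || decide ((y - yp) ∈ PySem.Set.ofList X2) ||
        (if PySem.Int.mod (PySem.Int.mod (y - yp) q + yp) q ≠ y then none
         else some (PySem.Int.mod (y - yp) q) : Option Int).isSome)
      (f := fun yp => ((yp, decide ((y - yp) ∈ PySem.Set.ofList X1), decide ((y - yp) ∈ PySem.Set.ofList X2),
        if PySem.Int.mod (PySem.Int.mod (y - yp) q + yp) q ≠ y then none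
        else some (PySem.Int.mod (y - yp) q)) : Int × Bool × Bool × Option Int)) Fq []]
  rw [show (fun yp => decide ((y - yp) ∈ PySem.Set.ofList X1) || decide ((y - yp) ∈ PySem.Set.ofList X2) ||
        (if PySem.Int.mod (PySem.Int.mod (y - yp) q + yp) q ≠ y then none
         else some (PySem.Int.mod (y - yp) q) : Option Int).isSome) = pvFlag q X1 X2 y from by
      funext yp
      simp [pvFlag, pvRec, PySem.Set.mem_ofList]]
  rw [show (fun yp => ((yp, decide ((y - yp) ∈ PySem.Set.ofList X1), decide ((y - yp) ∈ PySem.Set.ofList X2),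
        if PySem.Int.mod (PySem.Int.mod (y - yp) q + yp) q ≠ y then none
        else some (PySem.Int.mod (y - yp) q)) : Int × Bool × Bool × Option Int)) = pvRec q X1 X2 y from by
      funext yp
      simp [pvRec, PySem.Set.mem_ofList]]
  simp

-- B's dict comprehension initialises the same dict as A's keys loop
theorem pvInitB_eq (Fq : List Int) : pvInitB Fq = pvInit Fq := by
  unfold pvInitB pvInit pvKeys
  rw [show PySem.List.pyRange 0 2 1 = ([0, 1] : List Int) from by decide]

-- A's whole (y, yp)-step equals B's step on the record of yp
theorem pvStep_eq (q x y yp : Int) (X1 X2 : List Int) (Fq : List Int)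
    (d : PySem.Dict (Int × Int × Int) (List (Int × Int × Int))) :
    pvInnerA q x y yp Fq (pvXpart x y yp X1 X2 d) =
      pvStepB q x y (pvGroups q x Fq) d (pvRec q X1 X2 y yp) := by
  rw [pvInnerA_eq]
  unfold pvStepB pvRec pvXpart
  by_cases hc : PySem.Int.mod (PySem.Int.mod (y - yp) q + yp) q = y <;>
    by_cases h1 : (y - yp) ∈ X1 <;> by_cases h2 : (y - yp) ∈ X2 <;>
    simp [hc, h1, h2, pvLink, pvEdge]

-- A's step is the identity on the yp's B's table drops
theorem pvStep_id (q x y yp : Int) (X1 X2 : List Int) (Fq : List Int)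
    (d : PySem.Dict (Int × Int × Int) (List (Int × Int × Int)))
    (h : pvFlag q X1 X2 y yp = false) :
    pvInnerA q x y yp Fq (pvXpart x y yp X1 X2 d) = d := by
  simp only [pvFlag, pvRec, Bool.or_eq_false_iff, decide_eq_false_iff_not] at h
  obtain ⟨⟨h1, h2⟩, h3⟩ := h
  have hc : ¬ PySem.Int.mod (PySem.Int.mod (y - yp) q + yp) q = y := by
    intro hcc
    rw [if_neg (fun hg => hg hcc)] at h3
    simp at h3
  rw [pvInnerA_eq, if_neg hc]
  unfold pvXpart
  simp [h1, h2]

-- ===== VERDICT (by name: the statement is the Claim_ definition above) =====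
theorem create_routes_spec : Claim_equal_create_routes := by
  intro q Fq X1 X2 _ _
  unfold Spec_create_routes
  simp only [create_routes, create_routes_alt]
  rw [pvInitB_eq]
  refine congrArg (List.map _) (congrArg PySem.Dict.items ?_)
  apply PySem.List.foldl_congr_mem
  intro d x _
  apply PySem.List.foldl_congr_mem
  intro d y hy
  rw [pvActive_getD q _ _ Fq y hy, pvActs_eq]
  rw [show Fq.foldl (fun d yp => pvInnerA q x y yp Fq (pvXpart x y yp X1 X2 d)) d
        = Fq.foldl (fun d yp => if pvFlag q X1 X2 y yp = true
            then pvInnerA q x y yp Fq (pvXpart x y yp X1 X2 d) else d) d from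
      PySem.List.foldl_congr_mem _ _ _ _ (by
        intro d yp _
        by_cases hf : pvFlag q X1 X2 y yp = true
        · rw [if_pos hf]
        · rw [if_neg hf, pvStep_id q x y yp X1 X2 Fq d (by simpa using hf)])]
  rw [PySem.List.foldl_if_eq_foldl_filter (p := pvFlag q X1 X2 y)]
  rw [List.foldl_map]
  refine PySem.List.foldl_congr_mem _ _ _ _ ?_
  intro d yp _
  exact pvStep_eq q x y yp X1 X2 Fq d
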